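-- pv_equiv track=rewrite | github.com/amgiovenco/SharkMQP26 | backend/worker/extract_melt_block.py | pair_runs_text
-- ===== SOURCE A (Python) =====
-- from typing import List, Optional, Tuple
--
-- def find_all_marker_lines(lines: List[str], marker: str) -> List[int]:
--     return [i for i, line in enumerate(lines) if marker in line.strip()]
--
-- def pair_runs_text(lines: List[str], start_marker: str, end_marker: str) -> List[Tuple[int,int]]:
--     starts = find_all_marker_lines(lines, start_marker)
--     ends   = sorted(find_all_marker_lines(lines, end_marker))
--     pairs = []
--     for s in starts:
--         e = next((x for x in ends if x > s), None)
--         if e is not None: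
--             pairs.append((s, e))
--     return pairs
-- ===== SOURCE B (Python) =====
-- def pair_runs_text(lines, start_marker, end_marker):
--     # Single merge pass: ends come out of enumerate already increasing, so a
--     # monotone pointer j finds each start's next end without rescanning.
--     ends = [i for i, line in enumerate(lines) if end_marker in line.strip()]
--     pairs = []
--     j = 0
--     for i, line in enumerate(lines):
--         if start_marker in line.strip():
--             while j < len(ends) and ends[j] <= i:
--                 j += 1
--             if j < len(ends):
--                 pairs.append((i, ends[j]))
--     return pairs
-- ===== Notes on version B (the rewrite author's own statement) =====
-- stated objective: alternative
-- what changed: Replaces the per-start rescan of the ends list (and the sorted() call) with a single merge pass over the enumerated lines using a monotone pointer into the ends, which enumerate already yields in increasing order.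
import Mathlib
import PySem

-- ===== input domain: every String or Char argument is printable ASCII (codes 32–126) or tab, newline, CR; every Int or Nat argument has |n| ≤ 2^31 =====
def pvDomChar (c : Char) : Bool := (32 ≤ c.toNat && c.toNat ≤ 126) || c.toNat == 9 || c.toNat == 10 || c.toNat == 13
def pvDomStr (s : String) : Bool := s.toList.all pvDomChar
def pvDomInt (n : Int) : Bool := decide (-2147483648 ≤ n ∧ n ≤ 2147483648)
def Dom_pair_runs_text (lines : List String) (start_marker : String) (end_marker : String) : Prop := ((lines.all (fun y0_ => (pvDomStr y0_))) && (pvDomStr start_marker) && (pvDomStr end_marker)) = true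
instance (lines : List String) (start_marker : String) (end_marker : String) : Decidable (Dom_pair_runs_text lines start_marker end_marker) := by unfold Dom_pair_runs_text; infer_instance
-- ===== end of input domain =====

-- B replaces A's per-start rescan of the ends list (and its sorted() call) with a
-- single merge pass using a monotone pointer over the already-increasing ends.

-- ===== PORT A =====
def find_all_marker_lines (lines : List String) (marker : String) : List Int :=
  ((PySem.List.enumerate lines).filter
      (fun p => PySem.Str.isIn marker (PySem.Str.strip p.2))).map (fun p => p.1)

def pair_runs_text (lines : List String) (start_marker : String) (end_marker : String) : List (Int × Int) :=
  let starts := find_all_marker_lines lines start_marker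
  let ends := PySem.List.sorted (find_all_marker_lines lines end_marker) (fun x => x) false
  starts.foldl (fun pairs s =>
    match ends.find? (fun x => decide (s < x)) with
    | some e => pairs ++ [(s, e)]
    | none => pairs) []

-- ===== PORT B =====
def pair_runs_text_alt (lines : List String) (start_marker : String) (end_marker : String) : List (Int × Int) :=
  let ends : List Int :=
    ((PySem.List.enumerate lines).filter
        (fun p => PySem.Str.isIn end_marker (PySem.Str.strip p.2))).map (fun p => p.1)
  -- merge pass: the while loop advancing j over ends[j] ≤ i is the dropWhile on the suffix
  ((PySem.List.enumerate lines).foldl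
    (fun (st : List (Int × Int) × List Int) p =>
      if PySem.Str.isIn start_marker (PySem.Str.strip p.2) then
        match st.2.dropWhile (fun e => decide (e ≤ p.1)) with
        | [] => (st.1, [])
        | e :: es => (st.1 ++ [(p.1, e)], e :: es)
      else st) ([], ends)).1

-- ===== PRECONDITION & SPEC =====
def Spec_pair_runs_text (lines : List String) (start_marker : String) (end_marker : String) (out : List (Int × Int)) : Prop := out = pair_runs_text_alt lines start_marker end_marker
instance (lines : List String) (start_marker : String) (end_marker : String) (out : List (Int × Int)) : Decidable (Spec_pair_runs_text lines start_marker end_marker out) := by unfold Spec_pair_runs_text; infer_instance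

-- ===== CLAIM (what is proved, stated in full; the proofs are below) =====
def Claim_equal_pair_runs_text : Prop := ∀ (lines : List String) (start_marker : String) (end_marker : String), Dom_pair_runs_text lines start_marker end_marker → Spec_pair_runs_text lines start_marker end_marker (pair_runs_text lines start_marker end_marker)

-- ===== LEMMAS AND PROOFS =====

-- dropping ≤ s after already dropping ≤ t (t ≤ s) is dropping ≤ s (any list)
lemma dropWhile_le_dropWhile_le (E : List Int) (t s : Int) (h : t ≤ s) :
    (E.dropWhile (fun e => decide (e ≤ t))).dropWhile (fun e => decide (e ≤ s))
      = E.dropWhile (fun e => decide (e ≤ s)) := by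
  induction E with
  | nil => simp
  | cons x xs ih =>
    by_cases hx : x ≤ t
    · have hxs : x ≤ s := le_trans hx h
      simp [hx, hxs, ih]
    · simp [hx]

lemma dropWhile_le_neg_one (E : List Int) (h : ∀ e ∈ E, 0 ≤ e) :
    E.dropWhile (fun e => decide (e ≤ (-1 : Int))) = E := by
  cases E with
  | nil => rfl
  | cons x xs =>
    have : ¬ x ≤ (-1 : Int) := by have := h x (by simp); omega
    simp [this]

-- the merge loop of B computes exactly A's per-start find? over the whole ends list
lemma merge_loop_eq (sm : String) (E : List Int) :
    ∀ (ps : List (Int × String)) (acc : List (Int × Int)) (t : Int),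
      (∀ p ∈ ps, t ≤ p.1) →
      ps.Pairwise (fun a b => a.1 ≤ b.1) →
      (ps.foldl
        (fun (st : List (Int × Int) × List Int) p =>
          if PySem.Str.isIn sm (PySem.Str.strip p.2) then
            match st.2.dropWhile (fun e => decide (e ≤ p.1)) with
            | [] => (st.1, [])
            | e :: es => (st.1 ++ [(p.1, e)], e :: es)
          else st) (acc, E.dropWhile (fun e => decide (e ≤ t)))).1
      = ps.foldl (fun pairs p =>
          if PySem.Str.isIn sm (PySem.Str.strip p.2) then
            match E.find? (fun x => decide (p.1 < x)) with
            | some e => pairs ++ [(p.1, e)]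
            | none => pairs
          else pairs) acc := by
  intro ps
  induction ps with
  | nil => intro acc t _ _; rfl
  | cons p rest ih =>
    intro acc t ht hpw
    have htp : t ≤ p.1 := ht p (by simp)
    have hrest : ∀ q ∈ rest, p.1 ≤ q.1 := by
      intro q hq; exact (List.pairwise_cons.mp hpw).1 q hq
    have hpwrest := (List.pairwise_cons.mp hpw).2
    have hfun : (fun x : Int => !decide (p.1 < x)) = (fun e : Int => decide (e ≤ p.1)) := by
      funext x
      by_cases hx : p.1 < x
      · simp [hx]
      · simp [hx]
        omega
    have hfind : E.find? (fun x => decide (p.1 < x))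
        = (E.dropWhile (fun e => decide (e ≤ p.1))).head? := by
      rw [List.find?_eq_head?_dropWhile_not, hfun]
    simp only [List.foldl_cons]
    by_cases hc : PySem.Str.isIn sm (PySem.Str.strip p.2)
    · rw [dropWhile_le_dropWhile_le E t p.1 htp] at *
      cases hE : E.dropWhile (fun e => decide (e ≤ p.1)) with
      | nil =>
        have h0 : E.find? (fun x => decide (p.1 < x)) = none := by rw [hfind, hE]; rfl
        simp only [hc, if_true, h0]
        have hnil : ([] : List Int) = E.dropWhile (fun e => decide (e ≤ p.1)) := hE.symm
        calc (rest.foldl _ ((acc, ([] : List Int)))).1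
            = (rest.foldl _ ((acc, E.dropWhile (fun e => decide (e ≤ p.1))))).1 := by rw [← hnil]
          _ = _ := ih acc p.1 hrest hpwrest
      | cons e es =>
        have h1 : E.find? (fun x => decide (p.1 < x)) = some e := by rw [hfind, hE]; rfl
        simp only [hc, if_true, h1]
        calc (rest.foldl _ ((acc ++ [(p.1, e)], e :: es))).1
            = (rest.foldl _ ((acc ++ [(p.1, e)], E.dropWhile (fun e => decide (e ≤ p.1))))).1 := by rw [hE]
          _ = _ := ih (acc ++ [(p.1, e)]) p.1 hrest hpwrest
    · simp only [hc]
      exact ih acc t (fun q hq => le_trans htp (hrest q hq)) hpwrest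

-- ===== VERDICT (by name: the statement is the Claim_ definition above) =====
theorem pair_runs_text_spec : Claim_equal_pair_runs_text := by
  intro lines sm em _
  unfold Spec_pair_runs_text pair_runs_text pair_runs_text_alt find_all_marker_lines
  set enum := PySem.List.enumerate lines with henum
  set E := (enum.filter (fun p => PySem.Str.isIn em (PySem.Str.strip p.2))).map (fun p => p.1) with hE
  -- the ends list is strictly increasing, so A's sorted() is the identity
  have hpwE : E.Pairwise (fun a b => a < b) := by
    rw [hE]
    exact (List.pairwise_map).mpr ((PySem.List.pairwise_lt_enumerate lines 0).filter _)
  have hsorted : PySem.List.sorted E (fun x => x) false = E :=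
    PySem.List.sorted_eq_self_of_pairwise E (fun x => x) (hpwE.imp le_of_lt)
  rw [hsorted]
  -- A's fold over the filtered starts is a fold over the full enumeration with the test inside
  rw [List.foldl_map, List.foldl_filter]
  -- all indices are ≥ 0 so the initial suffix is the whole ends list
  have hEnn : ∀ e ∈ E, (0 : Int) ≤ e := by
    intro e he
    rw [hE] at he
    obtain ⟨p, hp, rfl⟩ := List.mem_map.mp he
    obtain ⟨k, hk, hpk⟩ := (PySem.List.mem_enumerate_iff lines 0 p).mp (List.mem_of_mem_filter hp)
    simp [hpk]
  have hnn : ∀ p ∈ enum, (-1 : Int) ≤ p.1 := by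
    intro p hp
    obtain ⟨k, hk, hpk⟩ := (PySem.List.mem_enumerate_iff lines 0 p).mp hp
    simp [hpk]
  have := merge_loop_eq sm E enum [] (-1) hnn
    ((PySem.List.pairwise_lt_enumerate lines 0).imp le_of_lt)
  rw [dropWhile_le_neg_one E hEnn] at this
  exact this.symm
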